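-- pv_equiv track=rewrite | github.com/feirik/Writeups | guessing_game_4/solve.py | make_list_eight
-- ===== SOURCE A (Python) =====
-- def make_list_eight(false_count_list):
--     zero_false_list = []
--     one_false_list = []
--     two_false_list = []
--     three_false_list = []
--
--     iter = 0
--     for i in false_count_list:
--         if i == 0:
--             zero_false_list.append(iter)
--         if i == 1:
--             one_false_list.append(iter)
--         if i == 2:
--             two_false_list.append(iter)
--         if i == 3:
--             three_false_list.append(iter)
--         iter += 1
--
--     remove_zero = zero_false_list[0:16]
--     remove_one = one_false_list[:112]
--     remove_two = two_false_list[:336]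
--     remove_three = three_false_list[:560]
--
--     test_list = remove_zero + remove_one + remove_two + remove_three
--
--     return test_list
-- ===== SOURCE B (Python) =====
-- def make_list_eight(false_count_list):
--     caps = {0: 16, 1: 112, 2: 336, 3: 560}
--     result = []
--     for v in (0, 1, 2, 3):
--         result.extend([i for i, x in enumerate(false_count_list) if x == v][:caps[v]])
--     return result
-- ===== Notes on version B (the rewrite author's own statement) =====
-- stated objective: simpler
-- what changed: Replaces the single interleaved pass that appends into four named accumulator lists with four independent filtered-enumerate scans, one per value 0..3, each sliced to its cap from a table and concatenated in order.
import Mathlib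
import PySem

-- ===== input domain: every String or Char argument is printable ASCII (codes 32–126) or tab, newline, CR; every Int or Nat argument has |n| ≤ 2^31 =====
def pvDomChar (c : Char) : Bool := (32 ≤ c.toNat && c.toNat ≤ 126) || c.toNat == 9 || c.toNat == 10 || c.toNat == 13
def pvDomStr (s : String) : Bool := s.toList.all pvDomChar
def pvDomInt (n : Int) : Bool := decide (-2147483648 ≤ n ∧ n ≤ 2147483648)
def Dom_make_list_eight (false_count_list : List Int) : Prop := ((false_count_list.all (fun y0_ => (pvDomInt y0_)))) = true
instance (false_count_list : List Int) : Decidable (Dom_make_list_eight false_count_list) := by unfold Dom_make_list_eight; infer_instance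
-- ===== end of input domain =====

-- B replaces A's single interleaved bucketing pass (four accumulator lists built in one loop)
-- with four independent filtered-enumerate scans, one per value 0..3, sliced to a cap table; same results.


-- ===== PORT A =====
-- one pass with a manual `iter` counter, appending the index into one of four lists, then slice and concatenate
def make_list_eight (false_count_list : List Int) : List Int :=
  let s := false_count_list.foldl
    (fun (st : List Int × List Int × List Int × List Int × Int) i =>
      let z := if i == 0 then st.1 ++ [st.2.2.2.2] else st.1
      let o := if i == 1 then st.2.1 ++ [st.2.2.2.2] else st.2.1
      let t := if i == 2 then st.2.2.1 ++ [st.2.2.2.2] else st.2.2.1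
      let th := if i == 3 then st.2.2.2.1 ++ [st.2.2.2.2] else st.2.2.2.1
      (z, o, t, th, st.2.2.2.2 + 1))
    ([], [], [], [], 0)
  PySem.List.slice s.1 (some 0) (some 16) ++ PySem.List.slice s.2.1 none (some 112)
    ++ PySem.List.slice s.2.2.1 none (some 336) ++ PySem.List.slice s.2.2.2.1 none (some 560)

-- ===== PORT B =====
-- [i for i, x in enumerate(false_count_list) if x == v][:caps[v]]
def pvAltBucket (xs : List Int) (v cap : Int) : List Int :=
  PySem.List.slice (((PySem.List.enumerate xs 0).filter (fun q => q.2 == v)).map (·.1)) none (some cap)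

def make_list_eight_alt (false_count_list : List Int) : List Int :=
  [((0:Int),(16:Int)), (1,112), (2,336), (3,560)].foldl
    (fun res p => res ++ pvAltBucket false_count_list p.1 p.2) []

-- ===== PRECONDITION & SPEC =====
def Spec_make_list_eight (false_count_list : List Int) (out : List Int) : Prop := out = make_list_eight_alt false_count_list
instance (false_count_list : List Int) (out : List Int) : Decidable (Spec_make_list_eight false_count_list out) := by unfold Spec_make_list_eight; infer_instance

-- ===== CLAIM (what is proved, stated in full; the proofs are below) =====
def Claim_equal_make_list_eight : Prop := ∀ (false_count_list : List Int), Dom_make_list_eight false_count_list → Spec_make_list_eight false_count_list (make_list_eight false_count_list)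

-- ===== LEMMAS AND PROOFS =====

-- the indices A's loop collects for value v are the filtered-enumerate indices
def pvIdx (xs : List Int) (it v : Int) : List Int :=
  ((PySem.List.enumerate xs it).filter (fun q => q.2 == v)).map (·.1)

lemma pvIdx_cons (x : Int) (xs : List Int) (it v : Int) :
    pvIdx (x :: xs) it v = (if x == v then [it] else []) ++ pvIdx xs (it + 1) v := by
  simp [pvIdx, PySem.List.enumerate_cons, List.filter_cons]
  split_ifs <;> simp_all

lemma loop_eq (xs : List Int) (it : Int) (z o t th : List Int) :
    xs.foldl
      (fun (st : List Int × List Int × List Int × List Int × Int) i =>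
        let z := if i == 0 then st.1 ++ [st.2.2.2.2] else st.1
        let o := if i == 1 then st.2.1 ++ [st.2.2.2.2] else st.2.1
        let t := if i == 2 then st.2.2.1 ++ [st.2.2.2.2] else st.2.2.1
        let th := if i == 3 then st.2.2.2.1 ++ [st.2.2.2.2] else st.2.2.2.1
        (z, o, t, th, st.2.2.2.2 + 1))
      (z, o, t, th, it) =
    (z ++ pvIdx xs it 0, o ++ pvIdx xs it 1, t ++ pvIdx xs it 2, th ++ pvIdx xs it 3,
      it + xs.length) := by
  induction xs generalizing it z o t th with
  | nil => simp [pvIdx, PySem.List.enumerate_nil]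
  | cons x xs ih =>
      simp only [List.foldl_cons, ih, pvIdx_cons]
      split_ifs <;> simp <;> omega

theorem make_list_eight_spec : Claim_equal_make_list_eight := by
  intro xs _
  unfold Spec_make_list_eight make_list_eight make_list_eight_alt pvAltBucket
  simp only [loop_eq, List.nil_append, List.foldl_cons, List.foldl_nil]
  simp [pvIdx]
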